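-- pv_equiv track=rewrite | github.com/REportPad/Algorithm | programmers/lv0/Morse_code1.py | solution
-- ===== SOURCE A (Python) =====
-- morse = {
--     '.-':'a','-...':'b','-.-.':'c','-..':'d','.':'e','..-.':'f',
--     '--.':'g','....':'h','..':'i','.---':'j','-.-':'k','.-..':'l',
--     '--':'m','-.':'n','---':'o','.--.':'p','--.-':'q','.-.':'r',
--     '...':'s','-':'t','..-':'u','...-':'v','.--':'w','-..-':'x',
--     '-.--':'y','--..':'z'
-- }
--
-- def solution(letter):
--     letter_size = len(letter)
--     i=0
--     res = ""
--     temp = ""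
--
--     while i < letter_size:
--         if letter[i] != ' ':
--             temp = temp + letter[i]
--             i += 1
--         else:
--             for key, val in morse.items():
--                 if key == temp:
--                     res = res + val
--                     break
--             i += 1
--             temp = ""
--
--     for key, val in morse.items():
--         if key == temp:
--             res = res + val
--             break
--
--     return res
-- ===== SOURCE B (Python) =====
-- # Morse decoded arithmetically: each token is turned into a binary code
-- # (leading 1, dot=0, dash=1) and looked up in a 32-entry table.
-- _TABLE = "??etianmsurwdkgohvf?l?pjbxcyzq??"
--
-- def solution(letter):
--     res = []
--     for tok in letter.split(' '):
--         code = 1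
--         for ch in tok:
--             if ch == '-':
--                 code = code * 2 + 1
--             elif ch == '.':
--                 code = code * 2
--             else:
--                 code = -1
--         if 2 <= code <= 31:
--             c = _TABLE[code]
--             if c != '?':
--                 res.append(c)
--     return ''.join(res)
-- ===== Notes on version B (the rewrite author's own statement) =====
-- stated objective: faster
-- what changed: Replaced the char-by-char while loop with its string accumulator and per-token linear scan over morse.items() by arithmetic decoding: each token is folded into a binary code (leading 1, dot=0, dash=1) and looked up in a 32-entry table, with no morse dict at all.
import Mathlib
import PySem

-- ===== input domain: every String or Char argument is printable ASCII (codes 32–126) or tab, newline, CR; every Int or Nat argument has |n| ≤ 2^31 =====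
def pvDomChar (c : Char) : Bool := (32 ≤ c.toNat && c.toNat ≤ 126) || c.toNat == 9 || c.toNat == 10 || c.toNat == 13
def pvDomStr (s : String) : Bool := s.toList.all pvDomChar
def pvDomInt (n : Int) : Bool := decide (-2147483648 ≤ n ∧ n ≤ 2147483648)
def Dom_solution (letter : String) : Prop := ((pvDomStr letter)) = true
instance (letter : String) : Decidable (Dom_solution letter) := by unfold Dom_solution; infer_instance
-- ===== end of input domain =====

set_option maxRecDepth 4096


-- B replaces A's char-by-char while loop (string accumulator, space branch, linear scan of
-- morse.items() per token, post-loop flush) by arithmetic decoding: each token is folded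
-- into a binary code (leading 1, dot=0, dash=1) and looked up in a fixed 32-entry table.

-- ===== PORT A =====
-- the module-level morse dict, in insertion order, as (key, value) pairs of char lists
def morseItems : List (List Char × List Char) :=
  [(['.','-'],['a']), (['-','.','.','.'],['b']), (['-','.','-','.'],['c']),
   (['-','.','.'],['d']), (['.'],['e']), (['.','.','-','.'],['f']),
   (['-','-','.'],['g']), (['.','.','.','.'],['h']), (['.','.'],['i']),
   (['.','-','-','-'],['j']), (['-','.','-'],['k']), (['.','-','.','.'],['l']),
   (['-','-'],['m']), (['-','.'],['n']), (['-','-','-'],['o']),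
   (['.','-','-','.'],['p']), (['-','-','.','-'],['q']), (['.','-','.'],['r']),
   (['.','.','.'],['s']), (['-'],['t']), (['.','.','-'],['u']),
   (['.','.','.','-'],['v']), (['.','-','-'],['w']), (['-','.','.','-'],['x']),
   (['-','.','-','-'],['y']), (['-','-','.','.'],['z'])]

-- 'for key, val in morse.items(): if key == temp: res = res + val; break'
def morseFlushA : List (List Char × List Char) → List Char → List Char → List Char
  | [], res, _ => res
  | (key, val) :: rest, res, temp =>
      if key = temp then res ++ val else morseFlushA rest res temp

-- the while loop: i walks the chars, (res, temp) the two accumulators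
def solutionLoopA : List Char → List Char → List Char → List Char
  | [], res, temp => morseFlushA morseItems res temp
  | c :: cs, res, temp =>
      if c ≠ ' ' then solutionLoopA cs res (temp ++ [c])
      else solutionLoopA cs (morseFlushA morseItems res temp) []

def solution (letter : String) : String :=
  String.ofList (solutionLoopA letter.toList [] [])

-- ===== PORT B =====
-- _TABLE = "??etianmsurwdkgohvf?l?pjbxcyzq??"
def morseTable : List Char := "??etianmsurwdkgohvf?l?pjbxcyzq??".toList

-- the inner for loop over the token's characters
def codeStep (code : Int) (ch : Char) : Int :=
  if ch = '-' then code * 2 + 1 else if ch = '.' then code * 2 else -1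

-- the body of the outer loop: the letter appended for one token (possibly none)
def tokLetter (tok : List Char) : List Char :=
  let code := tok.foldl codeStep 1
  if 2 ≤ code ∧ code ≤ 31 then
    let c := morseTable.getD code.toNat '?'
    if c ≠ '?' then [c] else []
  else []

def solution_alt (letter : String) : String :=
  String.ofList (((letter.toList.splitOn ' ').map tokLetter).flatten)

-- ===== PRECONDITION & SPEC =====
def Spec_solution (letter : String) (out : String) : Prop := out = solution_alt letter
instance (letter : String) (out : String) : Decidable (Spec_solution letter out) := by unfold Spec_solution; infer_instance

-- ===== CLAIM (what is proved, stated in full; the proofs are below) =====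
def Claim_equal_solution : Prop := ∀ (letter : String), Dom_solution letter → Spec_solution letter (solution letter)

-- ===== LEMMAS AND PROOFS =====

-- A's per-token lookup, as a plain function of the token
def lk (tok : List Char) : List Char := morseFlushA morseItems [] tok

lemma flushA_eq_lk (res temp : List Char) :
    morseFlushA morseItems res temp = res ++ lk temp := by
  unfold lk
  generalize morseItems = items
  induction items with
  | nil => simp [morseFlushA]
  | cons p rest ih =>
    obtain ⟨k, v⟩ := p
    by_cases h : k = temp
    · simp [morseFlushA, h]
    · simp [morseFlushA, h, ih]

lemma modifyHead_id' (l : List (List Char)) : List.modifyHead (fun x => x) l = l := by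
  cases l <;> rfl

lemma splitOn_ne_nil (cs : List Char) : cs.splitOn ' ' ≠ [] := by
  simp [List.splitOn]
  exact List.splitOnP_ne_nil _ cs

lemma loopA_eq (cs res temp : List Char) :
    solutionLoopA cs res temp
      = res ++ (((cs.splitOn ' ').modifyHead (temp ++ ·)).map lk).flatten := by
  induction cs generalizing res temp with
  | nil => simp [solutionLoopA, List.splitOn, List.splitOnP, List.splitOnP.go, flushA_eq_lk]
  | cons c cs ih =>
    by_cases h : c = ' '
    · subst h
      have h1 : solutionLoopA (' ' :: cs) res temp
          = solutionLoopA cs (morseFlushA morseItems res temp) [] := by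
        simp [solutionLoopA]
      have hs : (' ' :: cs).splitOn ' ' = [] :: cs.splitOn ' ' := by
        simp [List.splitOn, List.splitOnP_cons]
      rw [h1, flushA_eq_lk, ih, hs]
      simp only [List.modifyHead, List.append_assoc, List.map_cons, List.flatten_cons,
        List.nil_append, List.append_cancel_left_eq]
      cases List.splitOn ' ' cs <;> simp
    · have h1 : solutionLoopA (c :: cs) res temp
          = solutionLoopA cs res (temp ++ [c]) := by
        simp [solutionLoopA, h]
      rw [h1, ih]
      have hs : (c :: cs).splitOn ' ' = (cs.splitOn ' ').modifyHead (c :: ·) := by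
        simp [List.splitOn, List.splitOnP_cons, h]
      rw [hs]
      obtain ⟨t, rest, he⟩ := List.exists_cons_of_ne_nil (splitOn_ne_nil cs)
      rw [he]
      simp [List.modifyHead]

-- once the code has gone negative, it stays negative
lemma foldl_codeStep_neg (tok : List Char) : ∀ acc : Int, acc ≤ -1 →
    tok.foldl codeStep acc ≤ -1 := by
  induction tok with
  | nil => intro acc h; simpa using h
  | cons c cs ih =>
    intro acc h
    simp only [List.foldl_cons]
    apply ih
    unfold codeStep
    split_ifs <;> omega

-- over valid characters the code at least doubles per character
lemma foldl_codeStep_ge (tok : List Char) : ∀ acc : Int,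
    (∀ c ∈ tok, c = '.' ∨ c = '-') → 1 ≤ acc →
    acc * 2 ^ tok.length ≤ tok.foldl codeStep acc := by
  induction tok with
  | nil => intro acc _ _; simp
  | cons c cs ih =>
    intro acc hv h1
    simp only [List.foldl_cons, List.length_cons]
    have hstep : acc * 2 ≤ codeStep acc c ∧ 1 ≤ codeStep acc c := by
      rcases hv c (by simp) with h | h <;> simp [codeStep, h] <;> omega
    have := ih (codeStep acc c) (fun x hx => hv x (by simp [hx])) hstep.2
    have hmono : acc * 2 ^ (cs.length + 1) ≤ codeStep acc c * 2 ^ cs.length := by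
      have hp : (0:Int) < 2 ^ cs.length := by positivity
      have : acc * 2 * 2 ^ cs.length ≤ codeStep acc c * 2 ^ cs.length :=
        mul_le_mul_of_nonneg_right hstep.1 (le_of_lt hp)
      calc acc * 2 ^ (cs.length + 1) = acc * 2 * 2 ^ cs.length := by ring
        _ ≤ _ := this
    omega

-- a token containing an invalid character ends negative
lemma foldl_codeStep_invalid (tok : List Char) : ∀ acc : Int,
    (¬ ∀ c ∈ tok, c = '.' ∨ c = '-') →
    tok.foldl codeStep acc ≤ -1 := by
  induction tok with
  | nil => intro acc h; exact absurd (by simp) h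
  | cons c cs ih =>
    intro acc h
    simp only [List.foldl_cons]
    by_cases hc : c = '.' ∨ c = '-'
    · apply ih
      intro hall
      exact h (by intro x hx; rcases List.mem_cons.mp hx with rfl | hx; exact hc; exact hall x hx)
    · have hc1 : c ≠ '.' ∧ c ≠ '-' := by tauto
      have : codeStep acc c = -1 := by simp [codeStep, hc1.1, hc1.2]
      rw [this]
      exact foldl_codeStep_neg cs (-1) le_rfl

-- no morse key matches a token that is too long or has an invalid character
lemma lk_eq_nil_of_no_key (tok : List Char) (h : ∀ p ∈ morseItems, p.1 ≠ tok) :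
    lk tok = [] := by
  unfold lk
  revert h
  generalize morseItems = items
  induction items with
  | nil => intro _; rfl
  | cons p rest ih =>
    intro h
    obtain ⟨k, v⟩ := p
    have hk : k ≠ tok := h (k, v) (by simp)
    simp only [morseFlushA, if_neg hk]
    exact ih (fun q hq => h q (by simp [hq]))

-- the heart of the equivalence: B's arithmetic decode agrees with A's dict scan per token
lemma tokLetter_eq_lk (tok : List Char) : tokLetter tok = lk tok := by
  by_cases hval : ∀ c ∈ tok, c = '.' ∨ c = '-'
  · by_cases hlen : tok.length ≤ 4
    · -- finitely many valid short tokens: enumerate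
      rcases tok with _ | ⟨a, _ | ⟨b, _ | ⟨c, _ | ⟨d, _ | ⟨e, tl⟩⟩⟩⟩⟩
      · decide
      · rcases hval a (by simp) with rfl | rfl <;> decide
      · rcases hval a (by simp) with rfl | rfl <;> rcases hval b (by simp) with rfl | rfl <;> decide
      · rcases hval a (by simp) with rfl | rfl <;> rcases hval b (by simp) with rfl | rfl <;>
          rcases hval c (by simp) with rfl | rfl <;> decide
      · rcases hval a (by simp) with rfl | rfl <;> rcases hval b (by simp) with rfl | rfl <;>
          rcases hval c (by simp) with rfl | rfl <;> rcases hval d (by simp) with rfl | rfl <;> decide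
      · simp only [List.length_cons] at hlen; omega
    · -- long valid token: code ≥ 32 and no key is that long
      have hge := foldl_codeStep_ge tok 1 hval le_rfl
      have h32 : (32:Int) ≤ tok.foldl codeStep 1 := by
        have : (2:Int) ^ 5 ≤ 2 ^ tok.length := by
          apply pow_le_pow_right₀ (by norm_num)
          omega
        simp at hge
        calc (32:Int) = 2 ^ 5 := by norm_num
          _ ≤ 2 ^ tok.length := this
          _ ≤ _ := hge
      have hB : tokLetter tok = [] := by
        unfold tokLetter
        rw [if_neg]
        omega
      have hA : lk tok = [] := by
        apply lk_eq_nil_of_no_key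
        intro p hp heq
        have : p.1.length ≤ 4 := by
          revert hp; unfold morseItems; intro hp
          fin_cases hp <;> simp
        rw [heq] at this
        omega
      rw [hA, hB]
  · -- an invalid character: code is negative and no key contains such a character
    have hneg := foldl_codeStep_invalid tok 1 hval
    have hB : tokLetter tok = [] := by
      unfold tokLetter
      rw [if_neg]
      omega
    have hb : (morseItems.all fun p => p.1.all fun c => c == '.' || c == '-') = true := by rfl
    have hkeys : ∀ p ∈ morseItems, ∀ c ∈ p.1, c = '.' ∨ c = '-' := by
      intro p hp c hc
      have h1 := List.all_eq_true.mp hb p hp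
      have h2 := List.all_eq_true.mp h1 c hc
      simpa using h2
    have hA : lk tok = [] := by
      apply lk_eq_nil_of_no_key
      intro p hp heq
      apply hval
      rw [← heq]
      exact hkeys p hp
    rw [hA, hB]

-- ===== VERDICT (by name: the statement is the Claim_ definition above) =====
theorem solution_spec : Claim_equal_solution := by
  intro letter _
  show solution letter = solution_alt letter
  unfold solution solution_alt
  rw [loopA_eq]
  simp only [List.nil_append, modifyHead_id']
  exact congrArg (fun m => String.ofList m.flatten)
    (List.map_congr_left fun tok _ => (tokLetter_eq_lk tok).symm)
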